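-- pv_equiv track=rewrite | github.com/JFrunk/bridge-bidding-app | backend/engine/v2/features/enhanced_extractor.py | _get_partner_bids
-- ===== SOURCE A (Python) =====
-- from typing import Dict, Any, Optional, List
--
-- def _get_partner_bids(auction_history: List[str], my_position: str, dealer: str = 'North') -> List[str]:
--     """
--     Extract partner's bids from the auction history.
--
--     Args:
--         auction_history: List of bids in order
--         my_position: My position (North, East, South, West)
--         dealer: Dealer position (determines bid indexing)
--
--     Returns:
--         List of partner's bids in order
--     """
--     positions = ['North', 'East', 'South', 'West']
--     my_idx = positions.index(my_position) if my_position in positions else 0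
--     dealer_idx = positions.index(dealer) if dealer in positions else 0
--     partner_idx = (my_idx + 2) % 4  # Partner is across the table
--
--     partner_bids = []
--     for i, bid in enumerate(auction_history):
--         # Position of bid i = (dealer_idx + i) % 4
--         bid_position_idx = (dealer_idx + i) % 4
--         if bid_position_idx == partner_idx:
--             partner_bids.append(bid)
--
--     return partner_bids
-- ===== SOURCE B (Python) =====
-- from typing import List
--
-- _POSITION_INDEX = {'North': 0, 'East': 1, 'South': 2, 'West': 3}
--
-- def _get_partner_bids(auction_history: List[str], my_position: str, dealer: str = 'North') -> List[str]:
--     # Partner's bids sit at a fixed stride-4 pattern; compute the starting offset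
--     # from a position->index table and return the native strided slice.
--     offset = (_POSITION_INDEX.get(my_position, 0) + 2 - _POSITION_INDEX.get(dealer, 0)) % 4
--     return auction_history[offset::4]
-- ===== Notes on version B (the rewrite author's own statement) =====
-- stated objective: simpler
-- what changed: Replaces A's positions-list index guards and enumerate-and-filter loop by a position->index dictionary lookup, a single closed-form starting offset ((my+2-dealer) % 4) and the native strided slice auction_history[offset::4]; no loop or per-bid modular test remains.
import Mathlib
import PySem

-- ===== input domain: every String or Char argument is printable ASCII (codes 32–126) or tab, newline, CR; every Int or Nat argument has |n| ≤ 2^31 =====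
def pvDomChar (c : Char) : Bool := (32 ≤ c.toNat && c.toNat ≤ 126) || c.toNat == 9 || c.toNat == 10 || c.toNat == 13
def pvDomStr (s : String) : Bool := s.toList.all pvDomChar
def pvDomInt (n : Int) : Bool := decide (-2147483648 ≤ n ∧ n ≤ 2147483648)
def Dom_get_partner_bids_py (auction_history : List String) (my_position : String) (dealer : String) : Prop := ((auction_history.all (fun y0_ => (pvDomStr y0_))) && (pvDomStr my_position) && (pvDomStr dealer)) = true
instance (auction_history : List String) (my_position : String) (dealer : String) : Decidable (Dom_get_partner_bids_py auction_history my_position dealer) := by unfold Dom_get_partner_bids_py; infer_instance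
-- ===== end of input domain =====

-- ===== PORT A =====
-- B replaces A's list-index guards and enumerate-filter loop by a dict lookup, a closed-form
-- offset and a strided slice (objective: simpler).
def get_partner_bids_py (auction_history : List String) (my_position : String) (dealer : String) : List String :=
  let positions : List String := ["North", "East", "South", "West"]
  let my_idx : Int := if positions.contains my_position then ((PySem.List.index? positions my_position).getD 0 : Nat) else 0
  let dealer_idx : Int := if positions.contains dealer then ((PySem.List.index? positions dealer).getD 0 : Nat) else 0
  let partner_idx : Int := PySem.Int.mod (my_idx + 2) 4
  (PySem.List.enumerate auction_history 0).foldl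
    (fun partner_bids p =>
      if PySem.Int.mod (dealer_idx + p.1) 4 = partner_idx then partner_bids ++ [p.2] else partner_bids)
    []

-- ===== PORT B =====
def pvPositionIndex : PySem.Dict String Int :=
  PySem.Dict.ofList [("North", 0), ("East", 1), ("South", 2), ("West", 3)]

def get_partner_bids_py_alt (auction_history : List String) (my_position : String) (dealer : String) : List String :=
  let offset : Int :=
    PySem.Int.mod (pvPositionIndex.getD my_position 0 + 2 - pvPositionIndex.getD dealer 0) 4
  (PySem.List.slice? auction_history (some offset) none 4).getD []

-- ===== PRECONDITION & SPEC =====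
def Spec_get_partner_bids_py (auction_history : List String) (my_position : String) (dealer : String) (out : List String) : Prop := out = get_partner_bids_py_alt auction_history my_position dealer
instance (auction_history : List String) (my_position : String) (dealer : String) (out : List String) : Decidable (Spec_get_partner_bids_py auction_history my_position dealer out) := by unfold Spec_get_partner_bids_py; infer_instance

-- ===== CLAIM (what is proved, stated in full; the proofs are below) =====
def Claim_equal_get_partner_bids_py : Prop := ∀ (auction_history : List String) (my_position : String) (dealer : String), Dom_get_partner_bids_py auction_history my_position dealer → Spec_get_partner_bids_py auction_history my_position dealer (get_partner_bids_py auction_history my_position dealer)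

-- ===== LEMMAS AND PROOFS =====

/-- B's dict lookup agrees with A's `positions.index(...) if ... else 0` guard. -/
theorem dict_idx_eq (s : String) :
    pvPositionIndex.getD s 0 =
    (if (["North", "East", "South", "West"] : List String).contains s
      then (((PySem.List.index? ["North", "East", "South", "West"] s).getD 0 : Nat) : Int) else 0) := by
  by_cases h1 : s = "North"
  · subst h1; decide
  by_cases h2 : s = "East"
  · subst h2; decide
  by_cases h3 : s = "South"
  · subst h3; decide
  by_cases h4 : s = "West"
  · subst h4; decide
  have hc : (["North", "East", "South", "West"] : List String).contains s = false := by
    simp [List.contains_eq_mem, h1, h2, h3, h4]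
  rw [hc]
  simp only [Bool.false_eq_true, if_false]
  have e : pvPositionIndex = PySem.Dict.mk [("North", 0), ("East", 1), ("South", 2), ("West", 3)] := by decide
  have b1 : (("North" : String) == s) = false := by simp [beq_eq_false_iff_ne]; exact fun h => h1 h.symm
  have b2 : (("East" : String) == s) = false := by simp [beq_eq_false_iff_ne]; exact fun h => h2 h.symm
  have b3 : (("South" : String) == s) = false := by simp [beq_eq_false_iff_ne]; exact fun h => h3 h.symm
  have b4 : (("West" : String) == s) = false := by simp [beq_eq_false_iff_ne]; exact fun h => h4 h.symm
  rw [e, PySem.Dict.getD, PySem.Dict.get?_mk_cons, b1, if_neg (by simp), PySem.Dict.get?_mk_cons,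
    b2, if_neg (by simp), PySem.Dict.get?_mk_cons, b3, if_neg (by simp), PySem.Dict.get?_mk_cons,
    b4, if_neg (by simp)]
  rfl

/-- Every 4th element of `xs`, the first pick coming after `c` skipped elements. -/
def takeEvery4 {a : Type} : List a → Nat → List a
  | [], _ => []
  | x :: xs, 0 => x :: takeEvery4 xs 3
  | _ :: xs, Nat.succ c => takeEvery4 xs c

/-- A's enumerate-filter loop collects exactly every 4th element, starting at offset
`(t - d - s) % 4`. -/
theorem foldl_filter_mod (xs : List String) (d t : Int) (ht0 : 0 ≤ t) (ht4 : t < 4) :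
    ∀ (s : Int) (init : List String),
    (PySem.List.enumerate xs s).foldl
      (fun acc p => if PySem.Int.mod (d + p.1) 4 = t then acc ++ [p.2] else acc) init
    = init ++ takeEvery4 xs (PySem.Int.mod (t - d - s) 4).toNat := by
  induction xs with
  | nil => intro s init; simp [PySem.List.enumerate, takeEvery4]
  | cons x xs ih =>
    intro s init
    rw [PySem.List.enumerate_cons, List.foldl_cons]
    by_cases h : PySem.Int.mod (d + s) 4 = t
    · simp only [h, if_pos, ih (s + 1)]
      rw [PySem.Int.mod_eq_emod_of_pos (a := d + s) (by norm_num)] at h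
      rw [PySem.Int.mod_eq_emod_of_pos (by norm_num), PySem.Int.mod_eq_emod_of_pos (by norm_num)]
      have h1 : (t - d - s) % 4 = 0 := by omega
      have h2 : (t - d - (s + 1)) % 4 = 3 := by omega
      rw [h1, h2]
      simp [takeEvery4]
    · simp only [if_neg h, ih (s + 1)]
      rw [PySem.Int.mod_eq_emod_of_pos (a := d + s) (by norm_num)] at h
      rw [PySem.Int.mod_eq_emod_of_pos (by norm_num), PySem.Int.mod_eq_emod_of_pos (by norm_num)]
      have h1 : (t - d - s) % 4 = (t - d - (s + 1)) % 4 + 1 := by omega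
      rw [h1]
      have h2 : ((t - d - (s + 1)) % 4 + 1).toNat = ((t - d - (s + 1)) % 4).toNat + 1 := by omega
      rw [h2]
      simp [takeEvery4]

/-- Normal form of the stride-4 slice `xs[c::4]` for a natural start. -/
theorem slice4_norm {a : Type} (xs : List a) (c : Nat) :
    PySem.List.slice? xs (some (c : Int)) none 4 =
    some (List.filterMap (fun k => xs[min c xs.length + 4 * k]?)
      (List.range ((xs.length - min c xs.length + 3) / 4))) := by
  simp only [PySem.List.slice?, PySem.List.sliceIndices]
  norm_num
  have hc0 : ¬ ((c : Int) < 0) := by omega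
  have hs : (min (c : Int) (xs.length : Int)) = ((min c xs.length : Nat) : Int) := by
    push_cast; rfl
  simp only [if_neg hc0, hs]
  have hcount : (if ((min c xs.length : Nat) : Int) < (xs.length : Int) then
      (((xs.length : Int) - ((min c xs.length : Nat) : Int) + 4 - 1) / 4).toNat else 0)
      = (xs.length - min c xs.length + 3) / 4 := by
    split <;> omega
  rw [hcount]
  congr 1

/-- The stride-4 slice `xs[c::4]` is `takeEvery4 xs c`. -/
theorem stride4 {a : Type} (xs : List a) (c : Nat) (hc : c ≤ 4) :
    PySem.List.slice? xs (some (c : Int)) none 4 = some (takeEvery4 xs c) := by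
  induction xs generalizing c with
  | nil => simp [PySem.List.slice?, PySem.List.sliceIndices, takeEvery4]
  | cons x xs ih =>
    rw [slice4_norm]
    congr 1
    match c with
    | 0 =>
      simp only [List.length_cons, Nat.min_eq_left (by omega : 0 ≤ xs.length + 1)]
      have hcount : (xs.length + 1 - 0 + 3) / 4 = xs.length / 4 + 1 := by omega
      rw [hcount, List.range_succ_eq_map, List.filterMap_cons]
      simp only [Nat.zero_add, Nat.mul_zero, Nat.add_zero, List.getElem?_cons_zero,
        List.filterMap_map]
      have h3 := ih 3 (by omega)
      rw [slice4_norm] at h3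
      have h3' : takeEvery4 xs 3 = List.filterMap (fun k => xs[min 3 xs.length + 4 * k]?)
          (List.range ((xs.length - min 3 xs.length + 3) / 4)) := by
        exact (Option.some.injEq _ _ ▸ h3).symm
      show _ = takeEvery4 (x :: xs) 0
      simp only [takeEvery4]
      congr 1
      · rw [h3']
        by_cases hn : 3 ≤ xs.length
        · have hmin : min 3 xs.length = 3 := by omega
          have hc2 : (xs.length - 3 + 3) / 4 = xs.length / 4 := by omega
          rw [hmin, hc2]
          congr 1
          funext k
          simp only [Function.comp, Nat.succ_eq_add_one]
          have h4 : 4 * (k + 1) = (3 + 4 * k) + 1 := by omega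
          rw [h4, List.getElem?_cons_succ]
        · have h1 : xs.length / 4 = 0 := by omega
          have h2 : (xs.length - min 3 xs.length + 3) / 4 = 0 := by omega
          simp [h1, h2]
    | Nat.succ c =>
      have hmin : min (c + 1) (x :: xs).length = min c xs.length + 1 := by
        simp only [List.length_cons]; omega
      rw [hmin]
      have hcount : ((x :: xs).length - (min c xs.length + 1) + 3) / 4
          = (xs.length - min c xs.length + 3) / 4 := by
        simp only [List.length_cons]; omega
      rw [hcount]
      have hidx : (fun k => (x :: xs)[min c xs.length + 1 + 4 * k]?)
          = (fun k => xs[min c xs.length + 4 * k]?) := by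
        funext k
        have h4 : min c xs.length + 1 + 4 * k = (min c xs.length + 4 * k) + 1 := by omega
        rw [h4, List.getElem?_cons_succ]
      rw [hidx]
      have hx := ih c (by omega)
      rw [slice4_norm] at hx
      show _ = takeEvery4 (x :: xs) (c + 1)
      simp only [takeEvery4]
      exact Option.some.injEq _ _ ▸ hx

/-- A's loop equals the strided slice starting at `(t - d) % 4`. -/
theorem key (xs : List String) (d t : Int) (ht0 : 0 ≤ t) (ht4 : t < 4) :
    (PySem.List.enumerate xs 0).foldl
      (fun acc p => if PySem.Int.mod (d + p.1) 4 = t then acc ++ [p.2] else acc) []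
    = (PySem.List.slice? xs (some (PySem.Int.mod (t - d) 4)) none 4).getD [] := by
  have hnn : 0 ≤ PySem.Int.mod (t - d) 4 := PySem.Int.mod_nonneg _ (by norm_num)
  have hlt : PySem.Int.mod (t - d) 4 < 4 := PySem.Int.mod_lt _ (by norm_num)
  have hcast : PySem.Int.mod (t - d) 4 = (((PySem.Int.mod (t - d) 4).toNat : Nat) : Int) := by
    omega
  rw [hcast, stride4 xs (PySem.Int.mod (t - d) 4).toNat (by omega), Option.getD_some]
  have := foldl_filter_mod xs d t ht0 ht4 0 []
  simpa using this

/-- B's closed-form offset equals the slice start produced from A's partner index. -/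
theorem offset_eq (m d : Int) :
    PySem.Int.mod (m + 2 - d) 4 = PySem.Int.mod (PySem.Int.mod (m + 2) 4 - d) 4 := by
  rw [PySem.Int.mod_eq_emod_of_pos (by norm_num), PySem.Int.mod_eq_emod_of_pos (by norm_num),
    PySem.Int.mod_eq_emod_of_pos (by norm_num)]
  omega

-- ===== VERDICT (by name: the statement is the Claim_ definition above) =====
theorem get_partner_bids_py_spec : Claim_equal_get_partner_bids_py := by
  intro xs my dl _
  unfold Spec_get_partner_bids_py
  simp only [get_partner_bids_py, get_partner_bids_py_alt, dict_idx_eq, offset_eq]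
  exact key xs _ _ (PySem.Int.mod_nonneg _ (by norm_num)) (PySem.Int.mod_lt _ (by norm_num))
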